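-- pv_equiv track=rewrite | github.com/keechow/ProNumNum2020 | 4D_num.py | calc_occurence
-- ===== SOURCE A (Python) =====
-- def calc_occurence(str_num):
--     check_digit = ['0', '1', '2', '3', '4', '5', '6', '7', '8', '9']
--     occurence = 1
--     for each in check_digit:
--         count = str_num.count(each)
--         if count > occurence:
--             occurence = count
--     return occurence
-- ===== SOURCE B (Python) =====
-- def calc_occurence(str_num):
--     counts = {}
--     best = 1
--     for ch in str_num:
--         if ch in '0123456789':
--             c = counts.get(ch, 0) + 1
--             counts[ch] = c
--             if c > best:
--                 best = c
--     return best
-- ===== Notes on version B (the rewrite author's own statement) =====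
-- stated objective: alternative
-- what changed: Replaces A's ten separate full .count scans of the string (one per digit) with a single pass that builds a per-digit count dict while tracking the running maximum; fewer passes, but not measurably faster since A's scans run in C.
import Mathlib
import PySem

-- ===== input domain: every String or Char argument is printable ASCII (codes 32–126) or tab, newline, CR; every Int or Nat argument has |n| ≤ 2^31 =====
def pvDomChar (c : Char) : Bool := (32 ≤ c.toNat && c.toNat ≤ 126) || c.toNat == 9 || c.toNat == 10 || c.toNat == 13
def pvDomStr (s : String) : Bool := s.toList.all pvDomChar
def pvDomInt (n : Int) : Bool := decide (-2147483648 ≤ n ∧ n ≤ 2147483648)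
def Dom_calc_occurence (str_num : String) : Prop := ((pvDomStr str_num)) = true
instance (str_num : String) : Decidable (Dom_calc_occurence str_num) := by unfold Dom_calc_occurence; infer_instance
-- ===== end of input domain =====

-- B replaces A's ten full scans of the string (one `.count` per digit) by a single pass that
-- builds a per-digit count dict while tracking the running maximum (alternative decomposition).

-- ===== PORT A =====
-- A's literal list of the ten digit strings
def pvCheckDigit : List String := ["0", "1", "2", "3", "4", "5", "6", "7", "8", "9"]

def calc_occurence (str_num : String) : Int :=
  pvCheckDigit.foldl
    (fun occurence each =>
      let count : Int := (PySem.Str.count str_num each : Nat)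
      if count > occurence then count else occurence)
    1

-- ===== PORT B =====
-- the chars of the literal '0123456789' (Python's `ch in '0123456789'` is, for a single
-- character ch, exactly membership among these chars)
def pvDigitChars : List Char := ['0', '1', '2', '3', '4', '5', '6', '7', '8', '9']

def pvBStep (st : PySem.Dict Char Int × Int) (ch : Char) : PySem.Dict Char Int × Int :=
  if ch ∈ pvDigitChars then
    let c := st.1.getD ch 0 + 1
    let counts := st.1.insert ch c
    (counts, if c > st.2 then c else st.2)
  else st

def calc_occurence_alt (str_num : String) : Int :=
  (str_num.toList.foldl pvBStep (PySem.Dict.empty, 1)).2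

-- ===== PRECONDITION & SPEC =====
def Spec_calc_occurence (str_num : String) (out : Int) : Prop := out = calc_occurence_alt str_num
instance (str_num : String) (out : Int) : Decidable (Spec_calc_occurence str_num out) := by unfold Spec_calc_occurence; infer_instance

-- ===== CLAIM (what is proved, stated in full; the proofs are below) =====
def Claim_equal_calc_occurence : Prop := ∀ (str_num : String), Dom_calc_occurence str_num → Spec_calc_occurence str_num (calc_occurence str_num)

-- ===== LEMMAS AND PROOFS =====

-- `if a > b then a else b` is `max b a`
theorem pv_if_gt (a b : Int) : (if a > b then a else b) = max b a := by omega

-- Python's substring count for a single-character needle is the char count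
theorem pv_count_go_singleton (c : Char) :
    ∀ (l : List Char) (fuel acc : Nat), l.length ≤ fuel →
      PySem.Chars.count.go [c] fuel l acc = acc + l.count c := by
  intro l
  induction l with
  | nil => intro fuel acc _; cases fuel <;> simp [PySem.Chars.count.go]
  | cons h t ih =>
    intro fuel acc hle
    cases fuel with
    | zero => simp at hle
    | succ f =>
      by_cases hc : h = c
      · subst hc
        rw [show PySem.Chars.count.go [h] (f+1) (h :: t) acc
              = PySem.Chars.count.go [h] f t (acc + 1) from by
            simp [PySem.Chars.count.go, List.isPrefixOf]]
        rw [ih f (acc + 1) (by simpa using Nat.lt_succ_iff.mp (Nat.lt_of_lt_of_le (by simp) hle))]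
        simp
        omega
      · rw [show PySem.Chars.count.go [c] (f+1) (h :: t) acc
              = PySem.Chars.count.go [c] f t acc from by
            simp [PySem.Chars.count.go, List.isPrefixOf, Ne.symm hc]]
        rw [ih f acc (by simpa using Nat.lt_succ_iff.mp (Nat.lt_of_lt_of_le (by simp) hle))]
        simp [hc]

theorem pv_count_singleton (l : List Char) (c : Char) :
    PySem.Chars.count l [c] = l.count c := by
  have h := pv_count_go_singleton c l l.length 0 (le_refl _)
  simpa [PySem.Chars.count] using h

-- the maximum digit count of l (0 when l has no digits)
def pvM (l : List Char) : Int :=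
  (pvDigitChars.map (fun d => (l.count d : Int))).foldl max 0

-- counting in l ++ [c]
theorem pv_cnt_ne (l : List Char) (c e : Char) (h : c ≠ e) :
    (l ++ [c]).count e = l.count e := by
  rw [List.count_append, List.count_cons, List.count_nil]
  simp [h]

theorem pv_cnt_self (l : List Char) (c : Char) : (l ++ [c]).count c = l.count c + 1 := by
  simp

-- a foldl of max distributes over a max in its initial value
theorem pv_foldl_max_init (L : List Int) :
    ∀ a b : Int, L.foldl max (max a b) = max a (L.foldl max b) := by
  induction L with
  | nil => intro a b; rfl
  | cons x t ih =>
    intro a b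
    rw [List.foldl_cons, List.foldl_cons, show max (max a b) x = max a (max b x) from by omega,
      ih]

-- appending one occurrence of c bumps the folded maximum of the counts by `count c + 1`
theorem pv_bump (l : List Char) (c : Char) :
    ∀ L : List Char, c ∈ L → L.Nodup → ∀ b : Int,
      (L.map (fun d => ((l ++ [c]).count d : Int))).foldl max b
        = max ((L.map (fun d => (l.count d : Int))).foldl max b) ((l.count c : Int) + 1) := by
  intro L
  induction L with
  | nil => intro h; simp at h
  | cons d t ih =>
    intro hmem hnd b
    rw [List.map_cons, List.foldl_cons, List.map_cons, List.foldl_cons]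
    by_cases hdc : d = c
    · subst hdc
      have hnotin : d ∉ t := (List.nodup_cons.mp hnd).1
      have hmapeq : t.map (fun e => (((l ++ [d]).count e : Nat) : Int))
          = t.map (fun e => ((l.count e : Nat) : Int)) :=
        List.map_congr_left (fun e he => by
          rw [pv_cnt_ne l d e (fun h => hnotin (h ▸ he))])
      rw [hmapeq, pv_cnt_self]
      rw [show ((((l.count d + 1 : Nat)) : Int)) = ((l.count d : Int) + 1) from by push_cast; ring]
      rw [show max b ((l.count d : Int) + 1) = max ((l.count d : Int) + 1) b from max_comm _ _,
        pv_foldl_max_init,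
        show max b ((l.count d : Int)) = max ((l.count d : Int)) b from max_comm _ _,
        pv_foldl_max_init]
      generalize (t.map (fun e => ((l.count e : Nat) : Int))).foldl max b = F
      omega
    · have hct : c ∈ t := by
        rcases List.mem_cons.mp hmem with h | h
        · exact absurd h.symm hdc
        · exact h
      rw [pv_cnt_ne l c d (fun h => hdc h.symm), ih hct (List.nodup_cons.mp hnd).2]

-- A's fold with `if count > occ then count else occ` is a running maximum
theorem pv_foldA (f : String → Int) :
    ∀ (ds : List String) (a : Int),
      ds.foldl (fun occurence each =>
          let count : Int := f each
          if count > occurence then count else occurence) a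
        = (ds.map f).foldl max a := by
  intro ds
  induction ds with
  | nil => intro a; rfl
  | cons d t ih =>
    intro a
    rw [List.foldl_cons, List.map_cons, List.foldl_cons, ih]
    congr 1
    simp only []
    omega

theorem stepA (s : String) : calc_occurence s
    = (pvCheckDigit.map (fun each => ((PySem.Str.count s each : Nat) : Int))).foldl max 1 :=
  pv_foldA _ pvCheckDigit 1

-- the ten substring counts of A are the ten char counts of B
theorem pv_counts_eq (s : String) :
    pvCheckDigit.map (fun each => ((PySem.Str.count s each : Nat) : Int))
      = pvDigitChars.map (fun d => ((s.toList.count d : Nat) : Int)) := by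
  simp only [pvCheckDigit, pvDigitChars, List.map_cons, List.map_nil, PySem.Str.count_eq]
  rw [show ("0" : String).toList = ['0'] from rfl, pv_count_singleton,
    show ("1" : String).toList = ['1'] from rfl, pv_count_singleton,
    show ("2" : String).toList = ['2'] from rfl, pv_count_singleton,
    show ("3" : String).toList = ['3'] from rfl, pv_count_singleton,
    show ("4" : String).toList = ['4'] from rfl, pv_count_singleton,
    show ("5" : String).toList = ['5'] from rfl, pv_count_singleton,
    show ("6" : String).toList = ['6'] from rfl, pv_count_singleton,
    show ("7" : String).toList = ['7'] from rfl, pv_count_singleton,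
    show ("8" : String).toList = ['8'] from rfl, pv_count_singleton,
    show ("9" : String).toList = ['9'] from rfl, pv_count_singleton]

theorem pvA_eq (s : String) : calc_occurence s = max 1 (pvM s.toList) := by
  rw [stepA, pv_counts_eq s]
  have h2 := pv_foldl_max_init (pvDigitChars.map (fun d => ((s.toList.count d : Nat) : Int))) 1 0
  rw [show max (1 : Int) 0 = 1 from by decide] at h2
  rw [h2]
  rfl

-- invariant of B's single pass
theorem pvB_inv (l : List Char) :
    (∀ d : Char, (l.foldl pvBStep (PySem.Dict.empty, 1)).1.getD d 0
        = (if d ∈ pvDigitChars then (l.count d : Int) else 0)) ∧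
      (l.foldl pvBStep (PySem.Dict.empty, 1)).2 = max 1 (pvM l) := by
  induction l using List.reverseRecOn with
  | nil =>
    constructor
    · intro d; simp [PySem.Dict.getD_empty]
    · simp [pvM, pvDigitChars]
  | append_singleton l c ih =>
    obtain ⟨ihd, ihb⟩ := ih
    rw [List.foldl_append]
    by_cases hc : c ∈ pvDigitChars
    · simp only [List.foldl_cons, List.foldl_nil, pvBStep, if_pos hc]
      constructor
      · intro d
        rw [PySem.Dict.getD_insert]
        by_cases hdc : d = c
        · subst hdc
          rw [if_pos rfl, ihd d, if_pos hc, if_pos hc, pv_cnt_self]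
          simp
        · rw [if_neg hdc, ihd d]
          by_cases hd : d ∈ pvDigitChars
          · rw [if_pos hd, if_pos hd, pv_cnt_ne l c d (fun h => hdc h.symm)]
          · rw [if_neg hd, if_neg hd]
      · rw [pv_if_gt, ihb, ihd c, if_pos hc]
        have hb := pv_bump l c pvDigitChars hc (by decide) 0
        rw [show pvM (l ++ [c]) = max (pvM l) ((l.count c : Int) + 1) from hb]
        generalize pvM l = F
        generalize ((l.count c : Int)) = x
        omega
    · simp only [List.foldl_cons, List.foldl_nil, pvBStep, if_neg hc]
      have hcnt : ∀ d, d ∈ pvDigitChars → (l ++ [c]).count d = l.count d := by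
        intro d hd
        exact pv_cnt_ne l c d (fun h => hc (h ▸ hd))
      constructor
      · intro d
        rw [ihd d]
        by_cases hd : d ∈ pvDigitChars
        · rw [if_pos hd, if_pos hd, hcnt d hd]
        · rw [if_neg hd, if_neg hd]
      · rw [ihb]
        have hM : pvM (l ++ [c]) = pvM l := by
          unfold pvM
          rw [List.map_congr_left (fun d hd => by rw [hcnt d hd])]
        rw [hM]

theorem calc_occurence_spec_aux (s : String) : calc_occurence s = calc_occurence_alt s := by
  rw [pvA_eq, calc_occurence_alt, (pvB_inv s.toList).2]

-- ===== VERDICT (by name: the statement is the Claim_ definition above) =====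
theorem calc_occurence_spec : Claim_equal_calc_occurence := by
  intro s _
  unfold Spec_calc_occurence
  exact calc_occurence_spec_aux s
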